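-- pv_equiv track=rewrite | github.com/ghdaud30/Python_Coding | python/Level_1/모의고사.py | solution
-- ===== SOURCE A (Python) =====
-- def solution(answers):
--     answer = []
--     # 10000개를 만들어줌
--     a = [1, 2, 3, 4, 5] * 2000
--     b = [2, 1, 2, 3, 2, 4, 2, 5] * 1300
--     c = [3, 3, 1, 1, 2, 2, 4, 4, 5, 5] * 1000
--     score = [0,0,0]
--
--     # 각 학생 별로 점수 처리
--     for z,x,v,an in zip(a,b,c,answers):
--         if(z == an):
--             score[0] += 1
--         if(x == an):
--             score[1] += 1
--         if(v == an):
--             score[-1] += 1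
--
--     # 점수를 확인하여 답에 넣어줌
--     for idx , s in enumerate(score,1):
--         if(s == max(score)):
--             answer.append(idx)
--
--     return answer
-- ===== SOURCE B (Python) =====
-- def solution(answers):
--     # Histogram of (position mod 40, answer) over the first 10000 answers;
--     # 40 = lcm(5, 8, 10), so each residue class fixes every pattern's digit.
--     cnt = {}
--     for i, an in enumerate(answers[:10000]):
--         key = (i % 40, an)
--         cnt[key] = cnt.get(key, 0) + 1
--     patterns = [[1, 2, 3, 4, 5],
--                 [2, 1, 2, 3, 2, 4, 2, 5],
--                 [3, 3, 1, 1, 2, 2, 4, 4, 5, 5]]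
--     scores = [sum(cnt.get((r, p[r % len(p)]), 0) for r in range(40))
--               for p in patterns]
--     m = max(scores)
--     return [i for i, s in enumerate(scores, 1) if s == m]
-- ===== Notes on version B (the rewrite author's own statement) =====
-- stated objective: alternative
-- what changed: Instead of A's fused zip over three materialised 10000-element answer keys comparing every position against each key, B makes one pass that only builds a histogram keyed by (position mod 40, answer) (40 = lcm of the pattern periods), then computes each pattern's score as 40 dictionary lookups; pattern comparisons disappear from the scan.
import Mathlib
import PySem

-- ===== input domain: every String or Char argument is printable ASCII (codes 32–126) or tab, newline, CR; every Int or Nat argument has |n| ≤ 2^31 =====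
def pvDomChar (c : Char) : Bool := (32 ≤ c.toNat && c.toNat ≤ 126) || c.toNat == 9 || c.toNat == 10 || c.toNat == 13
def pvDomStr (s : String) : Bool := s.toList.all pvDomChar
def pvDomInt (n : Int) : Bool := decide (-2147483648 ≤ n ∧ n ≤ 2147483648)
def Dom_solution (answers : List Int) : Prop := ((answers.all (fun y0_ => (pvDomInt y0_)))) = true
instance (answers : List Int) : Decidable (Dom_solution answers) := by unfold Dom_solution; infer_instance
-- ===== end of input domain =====

-- B replaces A's fused zip over three materialised 10000-element answer keys by a single
-- histogram pass keyed by (position mod 40, answer) and 40 dictionary lookups per pattern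
-- (objective: alternative algorithm, same asymptotic cost).

-- ===== PORT A =====
def solution (answers : List Int) : List Int :=
  -- a = [1,2,3,4,5] * 2000, etc.
  let a := (List.replicate 2000 ([1, 2, 3, 4, 5] : List Int)).flatten
  let b := (List.replicate 1300 ([2, 1, 2, 3, 2, 4, 2, 5] : List Int)).flatten
  let c := (List.replicate 1000 ([3, 3, 1, 1, 2, 2, 4, 4, 5, 5] : List Int)).flatten
  -- for z,x,v,an in zip(a,b,c,answers): three independent 'if' updates of score
  let score := (a.zip (b.zip (c.zip answers))).foldl
    (fun (s : Int × Int × Int) q =>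
      (if q.1 == q.2.2.2 then s.1 + 1 else s.1,
       if q.2.1 == q.2.2.2 then s.2.1 + 1 else s.2.1,
       if q.2.2.1 == q.2.2.2 then s.2.2 + 1 else s.2.2)) ((0 : Int), (0 : Int), (0 : Int))
  let scoreList : List Int := [score.1, score.2.1, score.2.2]
  -- for idx, s in enumerate(score, 1): if s == max(score): answer.append(idx)
  (PySem.List.enumerate scoreList 1).foldl
    (fun acc q =>
      if q.2 == (PySem.List.max? scoreList (fun x => x)).getD 0 then acc ++ [q.1] else acc) []

-- ===== PORT B =====
-- for i, an in enumerate(answers[:10000]): key = (i % 40, an); cnt[key] = cnt.get(key, 0) + 1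
def pvHist (ans : List Int) : PySem.Dict (Int × Int) Int :=
  (PySem.List.enumerate ans 0).foldl
    (fun d q =>
      let key := (PySem.Int.mod q.1 40, q.2)
      d.insert key (d.getD key 0 + 1)) PySem.Dict.empty

def pvPatterns : List (List Int) :=
  [[1, 2, 3, 4, 5], [2, 1, 2, 3, 2, 4, 2, 5], [3, 3, 1, 1, 2, 2, 4, 4, 5, 5]]

def solution_alt (answers : List Int) : List Int :=
  let cnt := pvHist (PySem.List.slice answers none (some 10000))
  -- sum(cnt.get((r, p[r % len(p)]), 0) for r in range(40))
  let scores := pvPatterns.map (fun p =>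
    (PySem.List.pyRange 0 40 1).foldl
      (fun s r => s + cnt.getD (r, PySem.List.pyGetD p (PySem.Int.mod r (p.length : Int)) 0) 0) 0)
  let m := (PySem.List.max? scores (fun x => x)).getD 0
  ((PySem.List.enumerate scores 1).filter (fun q => q.2 == m)).map (fun q => q.1)

-- ===== PRECONDITION & SPEC =====
def Spec_solution (answers : List Int) (out : List Int) : Prop := out = solution_alt answers
instance (answers : List Int) (out : List Int) : Decidable (Spec_solution answers out) := by unfold Spec_solution; infer_instance

-- ===== CLAIM (what is proved, stated in full; the proofs are below) =====
def Claim_equal_solution : Prop := ∀ (answers : List Int), Dom_solution answers → Spec_solution answers (solution answers)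

-- ===== LEMMAS AND PROOFS =====

-- the value of the infinite repetition of p at position n
def cyc (p : List Int) (n : Nat) : Int := p.getD (n % p.length) 0

lemma flatten_replicate_getElem? (p : List Int) (hp : p ≠ []) :
    ∀ (k i : Nat), i < k * p.length →
      ((List.replicate k p).flatten)[i]? = some (cyc p i) := by
  intro k
  induction k with
  | zero => intro i h; simp at h
  | succ k ih =>
    intro i h
    rw [List.replicate_succ, List.flatten_cons]
    by_cases hi : i < p.length
    · rw [List.getElem?_append_left hi]
      simp [cyc, Nat.mod_eq_of_lt hi, List.getElem?_eq_getElem hi]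
    · rw [Nat.not_lt] at hi
      rw [List.getElem?_append_right hi]
      have hlen : 0 < p.length := List.length_pos_of_ne_nil hp
      have := ih (i - p.length) (by rw [Nat.succ_mul] at h; omega)
      rw [this]
      have : i % p.length = (i - p.length) % p.length := Nat.mod_eq_sub_mod hi
      simp [cyc, this]

lemma zip_take_right {α β : Type} (xs : List α) (ys : List β) :
    xs.zip ys = xs.zip (ys.take xs.length) := by
  induction xs generalizing ys with
  | nil => simp
  | cons x xs ih =>
    cases ys with
    | nil => simp
    | cons y ys =>
      simp only [List.zip_cons_cons, List.length_cons, List.take_succ_cons]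
      rw [← ih]

-- the number of positions i with ans[i] = cyc p (n + i), as a countP over enumerate
def cntE (p : List Int) (ans : List Int) (n : Int) : Int :=
  ((PySem.List.enumerate ans n).countP
    (fun q => q.2 == PySem.List.pyGetD p (PySem.Int.mod q.1 (p.length : Int)) 0) : Nat)

lemma cntE_cons (p : List Int) (an : Int) (ans : List Int) (n : Nat) :
    cntE p (an :: ans) (n : Int) =
      (if an == cyc p n then 1 else 0) + cntE p ans ((n : Int) + 1) := by
  unfold cntE
  rw [PySem.List.enumerate_cons, List.countP_cons]
  have : PySem.List.pyGetD p (PySem.Int.mod (n : Int) (p.length : Int)) 0 = cyc p n := by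
    rw [PySem.Int.mod_natCast, PySem.List.pyGetD_natCast]; rfl
  simp only [this]
  by_cases h : an == cyc p n <;> simp [h] <;> ring

-- the fused four-way zip fold over cyclic lists splits into the three cyclic match counts
lemma fused_split (pa pb pc : List Int) :
    ∀ (ans xa xb xc : List Int) (na nb nc : Nat) (s : Int × Int × Int),
      ans.length ≤ xa.length → ans.length ≤ xb.length → ans.length ≤ xc.length →
      (∀ j, j < ans.length → xa[j]? = some (cyc pa (na + j))) →
      (∀ j, j < ans.length → xb[j]? = some (cyc pb (nb + j))) →
      (∀ j, j < ans.length → xc[j]? = some (cyc pc (nc + j))) →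
      (xa.zip (xb.zip (xc.zip ans))).foldl
        (fun (s : Int × Int × Int) q =>
          (if q.1 == q.2.2.2 then s.1 + 1 else s.1,
           if q.2.1 == q.2.2.2 then s.2.1 + 1 else s.2.1,
           if q.2.2.1 == q.2.2.2 then s.2.2 + 1 else s.2.2)) s =
      (s.1 + cntE pa ans na, s.2.1 + cntE pb ans nb, s.2.2 + cntE pc ans nc) := by
  intro ans
  induction ans with
  | nil =>
    intro xa xb xc na nb nc s _ _ _ _ _ _
    simp [cntE, PySem.List.enumerate]
  | cons an ans ih =>
    intro xa xb xc na nb nc s hla hlb hlc ha hb hc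
    cases xa with
    | nil => simp at hla
    | cons za xa =>
    cases xb with
    | nil => simp at hlb
    | cons zb xb =>
    cases xc with
    | nil => simp at hlc
    | cons zc xc =>
    have hza : za = cyc pa na := by have := ha 0 (by simp); simpa using this
    have hzb : zb = cyc pb nb := by have := hb 0 (by simp); simpa using this
    have hzc : zc = cyc pc nc := by have := hc 0 (by simp); simpa using this
    simp only [List.zip_cons_cons, List.foldl_cons]
    rw [ih xa xb xc (na + 1) (nb + 1) (nc + 1) _
      (by simpa using hla) (by simpa using hlb) (by simpa using hlc)
      (fun j hj => by
        have := ha (j + 1) (by simpa using hj)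
        have e : na + 1 + j = na + (j + 1) := by omega
        rw [e]; simpa using this)
      (fun j hj => by
        have := hb (j + 1) (by simpa using hj)
        have e : nb + 1 + j = nb + (j + 1) := by omega
        rw [e]; simpa using this)
      (fun j hj => by
        have := hc (j + 1) (by simpa using hj)
        have e : nc + 1 + j = nc + (j + 1) := by omega
        rw [e]; simpa using this)]
    rw [cntE_cons, cntE_cons, cntE_cons]
    subst hza hzb hzc
    simp only [beq_iff_eq, Prod.mk.injEq, Nat.cast_add, Nat.cast_one]
    refine ⟨?_, ?_, ?_⟩ <;> split_ifs <;> omega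

lemma len_flatten_replicate (k : Nat) (p : List Int) :
    ((List.replicate k p).flatten).length = k * p.length := by
  induction k with
  | zero => simp
  | succ k ih => rw [List.replicate_succ, List.flatten_cons]; simp [ih, Nat.succ_mul]; omega

lemma score_eq (answers : List Int) :
    (((List.replicate 2000 ([1, 2, 3, 4, 5] : List Int)).flatten).zip
      (((List.replicate 1300 ([2, 1, 2, 3, 2, 4, 2, 5] : List Int)).flatten).zip
        (((List.replicate 1000 ([3, 3, 1, 1, 2, 2, 4, 4, 5, 5] : List Int)).flatten).zip
          answers))).foldl
      (fun (s : Int × Int × Int) q =>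
        (if q.1 == q.2.2.2 then s.1 + 1 else s.1,
         if q.2.1 == q.2.2.2 then s.2.1 + 1 else s.2.1,
         if q.2.2.1 == q.2.2.2 then s.2.2 + 1 else s.2.2)) ((0 : Int), (0 : Int), (0 : Int)) =
    (cntE [1, 2, 3, 4, 5] (answers.take 10000) 0,
     cntE [2, 1, 2, 3, 2, 4, 2, 5] (answers.take 10000) 0,
     cntE [3, 3, 1, 1, 2, 2, 4, 4, 5, 5] (answers.take 10000) 0) := by
  set pa : List Int := [1, 2, 3, 4, 5] with hpa
  set pb : List Int := [2, 1, 2, 3, 2, 4, 2, 5] with hpb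
  set pc : List Int := [3, 3, 1, 1, 2, 2, 4, 4, 5, 5] with hpc
  have hc10000 : ((List.replicate 1000 pc).flatten).length = 10000 := by
    rw [len_flatten_replicate, hpc]; rfl
  rw [zip_take_right ((List.replicate 1000 pc).flatten) answers, hc10000]
  have hlen : (answers.take 10000).length ≤ 10000 := by simp
  rw [fused_split pa pb pc (answers.take 10000) _ _ _ 0 0 0 _
    (by rw [len_flatten_replicate]; simp [hpa])
    (by rw [len_flatten_replicate]; simp [hpb])
    (by rw [len_flatten_replicate]; simp [hpc])
    (fun j hj => by
      rw [Nat.zero_add]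
      exact flatten_replicate_getElem? pa (by simp [hpa]) 2000 j (by simp [hpa]; omega))
    (fun j hj => by
      rw [Nat.zero_add]
      exact flatten_replicate_getElem? pb (by simp [hpb]) 1300 j (by simp [hpb]; omega))
    (fun j hj => by
      rw [Nat.zero_add]
      exact flatten_replicate_getElem? pc (by simp [hpc]) 1000 j (by simp [hpc]; omega))]
  simp

-- ===== B-side lemmas: the residue histogram recovers the cyclic match counts =====

-- the key function of B's single pass
def pvKey (q : Int × Int) : Int × Int := (PySem.Int.mod q.1 40, q.2)

lemma hist_getD (ans : List Int) (k : Int × Int) :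
    (pvHist ans).getD k 0 =
      (((PySem.List.enumerate ans 0).map pvKey).count k : Nat) := by
  have h1 : pvHist ans =
      ((PySem.List.enumerate ans 0).map pvKey).foldl
        (fun d k => d.insert k (d.getD k 0 + 1)) PySem.Dict.empty := by
    rw [List.foldl_map]; rfl
  rw [h1, PySem.Dict.getD_foldl_insert_add_one]
  simp

lemma sum_map_range_eq_finset (n : Nat) (f : Nat → Int) :
    ((List.range n).map f).sum = ∑ i ∈ Finset.range n, f i := by
  induction n with
  | zero => simp
  | succ n ih => rw [List.range_succ, Finset.sum_range_succ]; simp [ih]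

-- summing the indicator of one residue hit over all 40 residues
lemma sum_ind (v : Nat → Int) (k : Nat) (hk : k < 40) (x : Int) :
    (∑ r ∈ Finset.range 40,
      (if (((r : Nat) : Int), v r) = (((k : Nat) : Int), x) then (1 : Int) else 0)) =
    if x = v k then 1 else 0 := by
  rw [Finset.sum_eq_single k]
  · by_cases h : x = v k <;> simp [h, Prod.ext_iff, eq_comm]
  · intro r _ hr
    have : ((r : Nat) : Int) ≠ ((k : Nat) : Int) := by exact_mod_cast hr
    simp [Prod.ext_iff, this]
  · intro h; exact absurd (Finset.mem_range.mpr hk) h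

-- B's 40-residue sum of histogram counts equals the cyclic match count
lemma sum_count_eq_cntE (p : List Int) (hp : 0 < p.length) (hdvd : p.length ∣ 40) :
    ∀ (ans : List Int) (n : Nat),
      (∑ r ∈ Finset.range 40,
        ((((PySem.List.enumerate ans (n : Int)).map pvKey).count
            (((r : Nat) : Int), cyc p r) : Nat) : Int)) = cntE p ans n := by
  intro ans
  induction ans with
  | nil => intro n; simp [cntE, PySem.List.enumerate]
  | cons an ans ih =>
    intro n
    rw [PySem.List.enumerate_cons, cntE_cons]
    have hkey : pvKey ((n : Int), an) = (((n % 40 : Nat) : Int), an) := by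
      simp [pvKey, PySem.Int.mod_natCast]
    simp only [List.map_cons, hkey]
    have hsplit : ∀ r : Nat,
        (((((n % 40 : Nat) : Int), an) :: ((PySem.List.enumerate ans ((n : Int) + 1)).map pvKey)).count
          (((r : Nat) : Int), cyc p r) : Int) =
        (((PySem.List.enumerate ans ((n : Int) + 1)).map pvKey).count (((r : Nat) : Int), cyc p r) : Int)
          + (if (((r : Nat) : Int), cyc p r) = (((n % 40 : Nat) : Int), an) then (1 : Int) else 0) := by
      intro r
      rw [List.count_cons]
      split_ifs with h₁ h₂ h₂ <;> simp_all [beq_iff_eq] <;> omega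
    rw [Finset.sum_congr rfl (fun r _ => hsplit r), Finset.sum_add_distrib]
    have hcast : ((n : Int) + 1) = (((n + 1 : Nat)) : Int) := by push_cast; ring
    rw [hcast, ih (n + 1), sum_ind (cyc p) (n % 40) (Nat.mod_lt n (by omega)) an]
    have hcyc : cyc p (n % 40) = cyc p n := by
      unfold cyc
      rw [Nat.mod_mod_of_dvd n hdvd]
    rw [hcyc]
    by_cases h : an = cyc p n <;> simp [h] <;> ring

-- B's inner fold over range(40) computed on the histogram
lemma bscore_eq_cntE (p : List Int) (hp : 0 < p.length) (hdvd : p.length ∣ 40) (ans : List Int) :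
    ((PySem.List.pyRange 0 40 1).foldl
      (fun s r => s + (pvHist ans).getD (r, PySem.List.pyGetD p (PySem.Int.mod r (p.length : Int)) 0) 0) 0)
    = cntE p ans 0 := by
  have hrange : PySem.List.pyRange 0 40 1 = (List.range 40).map (fun n : Nat => (n : Int)) := by
    decide
  rw [hrange, PySem.List.foldl_add, List.map_map]
  have hterm : ∀ r : Nat,
      (pvHist ans).getD (((r : Nat) : Int),
        PySem.List.pyGetD p (PySem.Int.mod ((r : Nat) : Int) (p.length : Int)) 0) 0 =
      ((((PySem.List.enumerate ans 0).map pvKey).count (((r : Nat) : Int), cyc p r) : Nat) : Int) := by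
    intro r
    have : PySem.List.pyGetD p (PySem.Int.mod ((r : Nat) : Int) (p.length : Int)) 0 = cyc p r := by
      rw [PySem.Int.mod_natCast, PySem.List.pyGetD_natCast]; rfl
    rw [this, hist_getD]
  have : ((List.range 40).map
      ((fun r : Int => (pvHist ans).getD (r, PySem.List.pyGetD p (PySem.Int.mod r (p.length : Int)) 0) 0)
        ∘ (fun n : Nat => (n : Int)))).sum =
      ∑ r ∈ Finset.range 40,
        ((((PySem.List.enumerate ans 0).map pvKey).count (((r : Nat) : Int), cyc p r) : Nat) : Int) := by
    rw [sum_map_range_eq_finset]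
    exact Finset.sum_congr rfl (fun r _ => hterm r)
  have hsum := sum_count_eq_cntE p hp hdvd ans 0
  simp only [Nat.cast_zero] at hsum
  rw [this, hsum]
  simp

-- ===== VERDICT (by name: the statement is the Claim_ definition above) =====
theorem solution_spec : Claim_equal_solution := by
  intro answers _
  unfold Spec_solution
  simp only [solution, solution_alt, pvPatterns]
  rw [score_eq answers]
  rw [PySem.List.slice_to answers (by norm_num)]
  have ht : ((10000 : Int)).toNat = 10000 := rfl
  simp only [List.map_cons, List.map_nil, ht]
  rw [bscore_eq_cntE [1, 2, 3, 4, 5] (by norm_num) (by norm_num),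
      bscore_eq_cntE [2, 1, 2, 3, 2, 4, 2, 5] (by norm_num) (by norm_num),
      bscore_eq_cntE [3, 3, 1, 1, 2, 2, 4, 4, 5, 5] (by norm_num) (by norm_num)]
  rw [PySem.List.foldl_append_if]
  simp only [List.nil_append]
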